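-- pv_equiv track=rewrite | github.com/sharma-anubhav/CrackingTheCodingInterview-DSA | ch27(2PT)/27.2.py | ktest
-- ===== SOURCE A (Python) =====
-- def ktest(arr):
--     sp, fp = 0,0
--     ss, fs = 0,0
--     while sp < len(arr) and fp < len(arr):
--         ss = ss+arr[sp]
--         fs = fs+arr[fp]+arr[fp+1]
--         if ss > fs:
--             return False
--         sp+=1
--         fp+=2
--     return True
-- ===== SOURCE B (Python) =====
-- def ktest(arr):
--     # Build the full prefix-sum table once, then scan it by index.
--     P = []
--     t = 0
--     for x in arr:
--         t += x
--         P.append(t)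
--     i = 0
--     while 2 * i < len(arr):
--         if P[i] > P[2 * i + 1]:
--             return False
--         i += 1
--     return True
-- ===== Notes on version B (the rewrite author's own statement) =====
-- stated objective: alternative
-- what changed: B precomputes the full prefix-sum table once and then scans it with a single index, instead of maintaining two running sums behind two pointers.
import Mathlib
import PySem

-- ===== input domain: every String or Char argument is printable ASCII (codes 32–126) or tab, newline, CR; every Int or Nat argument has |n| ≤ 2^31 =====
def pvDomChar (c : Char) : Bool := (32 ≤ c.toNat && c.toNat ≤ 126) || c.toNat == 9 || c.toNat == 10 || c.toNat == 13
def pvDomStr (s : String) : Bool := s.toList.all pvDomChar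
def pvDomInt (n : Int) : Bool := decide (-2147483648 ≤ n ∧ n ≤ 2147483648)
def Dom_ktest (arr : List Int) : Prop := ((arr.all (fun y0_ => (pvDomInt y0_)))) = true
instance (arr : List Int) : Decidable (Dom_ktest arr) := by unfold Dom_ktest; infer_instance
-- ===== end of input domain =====

-- B builds the full prefix-sum table once and scans it by index, instead of A's two running sums behind two pointers (alternative decomposition, same cost).


-- ===== PORT A =====
-- A's while loop: slow pointer sp with running sum ss, fast pointer fp with running sum fs.
-- Indexing uses getD; inside Pre_ktest every index taken is in range (arr[fp+1] raising is excluded by Pre_).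
def ktestLoop (arr : List Int) (sp fp : Nat) (ss fs : Int) : Bool :=
  if h : sp < arr.length ∧ fp < arr.length then
    let ss' := ss + arr.getD sp 0
    let fs' := fs + arr.getD fp 0 + arr.getD (fp + 1) 0
    if ss' > fs' then false
    else ktestLoop arr (sp + 1) (fp + 2) ss' fs'
  else true
termination_by arr.length - sp
decreasing_by omega

def ktest (arr : List Int) : Bool := ktestLoop arr 0 0 0 0

-- ===== PORT B =====
-- prefix-sum table: P[k] = t + arr[0] + ... + arr[k]
def prefixAcc (arr : List Int) (t : Int) : List Int :=
  match arr with
  | [] => []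
  | x :: xs => (t + x) :: prefixAcc xs (t + x)

def ktestScan (P : List Int) (n i : Nat) : Bool :=
  if h : 2 * i < n then
    if P.getD i 0 > P.getD (2 * i + 1) 0 then false
    else ktestScan P n (i + 1)
  else true
termination_by n - 2 * i
decreasing_by omega

def ktest_alt (arr : List Int) : Bool := ktestScan (prefixAcc arr 0) arr.length 0

-- ===== PRECONDITION & SPEC =====
-- Pre_ excludes exactly the inputs where A raises IndexError (arr[fp+1] with fp+1 = len(arr)):
-- odd-length arrays on which no earlier slow-sum > fast-sum violation returns False first; B raises there too.
def Pre_ktest (arr : List Int) : Prop :=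
  arr.length % 2 = 0 ∨
    ∃ j ∈ Finset.range arr.length,
      2 * j + 1 < arr.length ∧ (arr.take (j + 1)).sum > (arr.take (2 * j + 2)).sum
instance (arr : List Int) : Decidable (Pre_ktest arr) := by unfold Pre_ktest; infer_instance

def pvWitness_ktest : List Int := ([1, 2, 3, 4])

def Spec_ktest (arr : List Int) (out : Bool) : Prop := out = ktest_alt arr
instance (arr : List Int) (out : Bool) : Decidable (Spec_ktest arr out) := by unfold Spec_ktest; infer_instance

-- ===== CLAIM (what is proved, stated in full; the proofs are below) =====
def Claim_equal_ktest : Prop := ∀ (arr : List Int), Dom_ktest arr → Pre_ktest arr → Spec_ktest arr (ktest arr)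

-- ===== LEMMAS AND PROOFS =====

lemma sumTake_succ (arr : List Int) (i : Nat) (h : i < arr.length) :
    (arr.take (i + 1)).sum = (arr.take i).sum + arr.getD i 0 := by
  induction arr generalizing i with
  | nil => simp at h
  | cons x xs ih =>
    cases i with
    | zero => simp
    | succ k =>
      simp only [List.take_succ_cons, List.sum_cons, List.getD_cons_succ]
      rw [ih k (by simpa using h)]
      ring

lemma prefixAcc_getD (arr : List Int) (t : Int) (k : Nat) (h : k < arr.length) :
    (prefixAcc arr t).getD k 0 = t + (arr.take (k + 1)).sum := by
  induction arr generalizing t k with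
  | nil => simp at h
  | cons x xs ih =>
    cases k with
    | zero => simp [prefixAcc]
    | succ m =>
      simp only [prefixAcc, List.getD_cons_succ, List.take_succ_cons, List.sum_cons]
      rw [ih (t + x) m (by simpa using h)]
      ring

lemma loop_eq (arr : List Int) (i : Nat)
    (hpre : arr.length % 2 = 0 ∨
      ∃ j, i ≤ j ∧ 2 * j + 1 < arr.length ∧
        (arr.take (j + 1)).sum > (arr.take (2 * j + 2)).sum) :
    ktestLoop arr i (2 * i) ((arr.take i).sum) ((arr.take (2 * i)).sum)
      = ktestScan (prefixAcc arr 0) arr.length i := by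
  by_cases hlt : 2 * i < arr.length
  · have hi : i < arr.length := by omega
    -- fp+1 = 2*i+1 is in range: otherwise length is odd with no later violation
    have hfp1 : 2 * i + 1 < arr.length := by
      rcases hpre with heven | ⟨j, hij, hj, _⟩
      · omega
      · omega
    have hcondA : i < arr.length ∧ 2 * i < arr.length := ⟨hi, hlt⟩
    rw [ktestLoop, ktestScan]
    simp only [dif_pos hcondA, dif_pos hlt]
    have e1 : (arr.take i).sum + arr.getD i 0 = (arr.take (i + 1)).sum :=
      (sumTake_succ arr i hi).symm
    have e2 : (arr.take (2 * i)).sum + arr.getD (2 * i) 0 + arr.getD (2 * i + 1) 0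
        = (arr.take (2 * i + 2)).sum := by
      have a1 := sumTake_succ arr (2 * i) hlt
      have a2 : (arr.take (2 * i + 2)).sum
          = (arr.take (2 * i + 1)).sum + arr.getD (2 * i + 1) 0 :=
        sumTake_succ arr (2 * i + 1) hfp1
      omega
    have p1 : (prefixAcc arr 0).getD i 0 = (arr.take (i + 1)).sum := by
      rw [prefixAcc_getD arr 0 i hi]; ring
    have p2 : (prefixAcc arr 0).getD (2 * i + 1) 0 = (arr.take (2 * i + 2)).sum := by
      rw [prefixAcc_getD arr 0 (2 * i + 1) hfp1]; ring
    rw [e1, e2, p1, p2]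
    by_cases hviol : (arr.take (i + 1)).sum > (arr.take (2 * i + 2)).sum
    · simp [hviol]
    · simp only [if_neg hviol]
      have harg : 2 * i + 2 = 2 * (i + 1) := by ring
      have hnext := loop_eq arr (i + 1) (by
        rcases hpre with heven | ⟨j, hij, hj, hv⟩
        · exact Or.inl heven
        · right
          refine ⟨j, ?_, hj, hv⟩
          rcases Nat.lt_or_ge i j with h' | h'
          · omega
          · have : i = j := by omega
            subst this; exact absurd hv hviol)
      rw [harg] at *
      convert hnext using 2 <;> omega
  · rw [ktestLoop, ktestScan]
    simp [hlt]
termination_by arr.length - 2 * i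
decreasing_by omega

-- ===== VERDICT (by name: the statement is the Claim_ definition above) =====
theorem ktest_spec : Claim_equal_ktest := by
  intro arr _ hpre
  unfold Spec_ktest ktest ktest_alt
  have h0 := loop_eq arr 0 (by
    rcases hpre with heven | ⟨j, hj, hlt, hv⟩
    · exact Or.inl heven
    · exact Or.inr ⟨j, Nat.zero_le j, hlt, hv⟩)
  simpa using h0
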